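-- pv_equiv track=rewrite | github.com/noahgill409/bedevere | discrete_sums.py | convolution_list
-- ===== SOURCE A (Python) =====
-- from typing import Tuple, Union, List
--
-- def convolution(x: dict, y: dict) -> dict:
--     """Return a distribution representing the sum of two distributions"""
--
--     # TODO: add scale, scale: tuple = None
--     # if scale:
--     #     for key, val in x.items():
--     #         x[key] = val * scale[0]
--     #
--     #     for key, val in y.items():
--     #         y[key] = val * scale[1]
--
--     z = {}
--
--     for j in range(sum([min(x), min(y)]), sum([max(x), max(y)]) + 1):
--         rolling_sum = 0
--
--         for k in x.keys():
--             if j - k in y: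
--                 rolling_sum += x[k] * y[j - k]
--
--         if not rolling_sum == 0:
--             z[j] = rolling_sum
--
--     return z
--
-- def convolution_list(x: List[dict]) -> dict:
--     """Return a distribution representing the sum of all distributions in a list"""
--     assert len(x) > 1
--
--     z = convolution(x[0], x[1])
--
--     for i, d in enumerate(x):
--         if i < 2:
--             continue
--
--         z = convolution(z, d)
--
--     return z
-- ===== SOURCE B (Python) =====
-- from typing import List
--
--
-- def convolution_list(x: List[dict]) -> dict:
--     """Return a distribution representing the sum of all distributions in a list"""
--     assert len(x) > 1
--
--     z = x[0]
--     for d in x[1:]: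
--         c = {}
--         for k1, v1 in z.items():
--             for k2, v2 in d.items():
--                 c[k1 + k2] = c.get(k1 + k2, 0) + v1 * v2
--         z = {k: c[k] for k in sorted(c) if c[k] != 0}
--     return z
-- ===== Notes on version B (the rewrite author's own statement) =====
-- stated objective: faster
-- what changed: Replaces A's scan of every integer j in the range [min+min, max+max] with an inner key loop per j by direct pairwise key-sum accumulation into a dict followed by one sort of the support keys, so cost depends on the number of keys, not on the key range. …
-- outside the precondition, e.g. on convolution_list([{0: 1}, {0: 1}, {0: 0}]): A returns {}, B returns {}
import Mathlib
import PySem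

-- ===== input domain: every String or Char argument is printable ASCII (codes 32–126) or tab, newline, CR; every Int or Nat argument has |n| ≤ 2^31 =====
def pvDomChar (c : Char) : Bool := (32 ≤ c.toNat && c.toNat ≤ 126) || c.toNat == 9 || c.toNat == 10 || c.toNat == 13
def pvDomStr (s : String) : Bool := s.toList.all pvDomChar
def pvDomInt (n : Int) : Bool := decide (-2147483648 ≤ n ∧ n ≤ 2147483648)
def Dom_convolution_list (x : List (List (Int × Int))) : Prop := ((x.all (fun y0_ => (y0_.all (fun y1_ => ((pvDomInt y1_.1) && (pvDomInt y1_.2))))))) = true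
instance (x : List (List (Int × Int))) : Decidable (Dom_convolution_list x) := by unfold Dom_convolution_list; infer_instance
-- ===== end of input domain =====

-- B replaces A's scan over the whole integer key range by pairwise key-sum accumulation
-- plus one sort of the support keys (objective: faster, asymptotic in the key range).


-- ===== PORT A =====
-- min(x) / max(x) over a Python dict iterate its keys; the '.getD 0' default is never
-- reached under Pre_ (every dict involved is nonempty there; on an empty dict Python raises).
def pyMinKey (d : PySem.Dict Int Int) : Int := (PySem.List.min? d.keys (fun k => k)).getD 0

def pyMaxKey (d : PySem.Dict Int Int) : Int := (PySem.List.max? d.keys (fun k => k)).getD 0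

-- literal port of A's helper 'convolution'
def convolutionA (x y : PySem.Dict Int Int) : PySem.Dict Int Int :=
  (PySem.List.pyRange ([pyMinKey x, pyMinKey y].sum) ([pyMaxKey x, pyMaxKey y].sum + 1) 1).foldl
    (fun z j =>
      let rollingSum := x.keys.foldl
        (fun r k => if y.contains (j - k) then r + x.getD k 0 * y.getD (j - k) 0 else r) 0
      if ¬ rollingSum = 0 then z.insert j rollingSum else z)
    PySem.Dict.empty

-- port of A ('assert len(x) > 1' raises outside Pre_; x[0], x[1] defaulted, never reached under Pre_)
def convolution_list (x : List (List (Int × Int))) : List (Int × Int) :=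
  ((PySem.List.enumerate x).foldl
      (fun z p => if p.1 < 2 then z else convolutionA z (PySem.Dict.mk p.2))
      (convolutionA (PySem.Dict.mk ((PySem.List.pyGet? x 0).getD []))
                    (PySem.Dict.mk ((PySem.List.pyGet? x 1).getD [])))).items

-- ===== PORT B =====
-- literal port of B's loop body: pairwise accumulation into c, then sorted nonzero support
def convolutionB (z d : List (Int × Int)) : List (Int × Int) :=
  let c := z.foldl (fun c p => d.foldl
      (fun c q => c.insert (p.1 + q.1) (c.getD (p.1 + q.1) 0 + p.2 * q.2)) c)
    (PySem.Dict.empty : PySem.Dict Int Int)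
  ((PySem.List.sorted c.keys (fun k => k) false).filter (fun k => ¬ c.getD k 0 = 0)).map
    (fun k => (k, c.getD k 0))

def convolution_list_alt (x : List (List (Int × Int))) : List (Int × Int) :=
  (PySem.List.slice x (some 1) none).foldl convolutionB ((PySem.List.pyGet? x 0).getD [])

-- ===== PRECONDITION & SPEC =====
-- Pre_ admits length ≥ 2 lists of nonempty duplicate-key-free dicts that (unless the list
-- has length exactly 2, where A never raises) each contain some nonzero value: on a shorter
-- list or an empty dict A raises (assert / min of empty), and an all-zero dict makes an
-- intermediate convolution cancel to the empty dict, on which A's min() raises ValueError —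
-- predicting that exactly would require running the algorithm, so Pre_ uses this static
-- guarantee (the smallest nonzero-valued key sum always keeps a nonzero product, hence every
-- intermediate stays nonempty), excluding a few inputs on which A still returns (an all-zero
-- dict in the LAST position only; B matches A there too whenever A returns).
def Pre_convolution_list (x : List (List (Int × Int))) : Prop :=
  2 ≤ x.length ∧ ∀ d ∈ x, d ≠ [] ∧ (d.map (·.1)).Nodup ∧
    (x.length = 2 ∨ ∃ p ∈ d, p.2 ≠ 0)

instance (x : List (List (Int × Int))) : Decidable (Pre_convolution_list x) := by
  unfold Pre_convolution_list; infer_instance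

def pvWitness_convolution_list : (List (List (Int × Int))) := [[(0, 1), (1, 2)], [(0, 1)]]

def Spec_convolution_list (x : List (List (Int × Int))) (out : List (Int × Int)) : Prop := out = convolution_list_alt x
instance (x : List (List (Int × Int))) (out : List (Int × Int)) : Decidable (Spec_convolution_list x out) := by unfold Spec_convolution_list; infer_instance

-- ===== CLAIM (what is proved, stated in full; the proofs are below) =====
def Claim_equal_convolution_list : Prop := ∀ (x : List (List (Int × Int))), Dom_convolution_list x → Pre_convolution_list x → Spec_convolution_list x (convolution_list x)

-- ===== LEMMAS AND PROOFS =====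

-- the exact coefficient of j in the convolution of dicts x and y
def sVal (x y : PySem.Dict Int Int) (j : Int) : Int :=
  (x.keys.map (fun k => x.getD k 0 * y.getD (j - k) 0)).sum

-- the list of (key-sum, value-product) pairs B's inner double loop runs over
def pairsProd (z d : List (Int × Int)) : List (Int × Int) :=
  z.flatMap (fun p => d.map (fun q => (p.1 + q.1, p.2 * q.2)))

-- nonempty, duplicate-key-free dict containing some nonzero value
def Good (l : List (Int × Int)) : Prop :=
  l ≠ [] ∧ (l.map (·.1)).Nodup ∧ ∃ p ∈ l, p.2 ≠ 0

-- A's inner loop, from any accumulator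
theorem innerA_gen (x y : PySem.Dict Int Int) (j : Int) :
    ∀ (ks : List Int) (r : Int),
    ks.foldl (fun r k => if y.contains (j - k) then r + x.getD k 0 * y.getD (j - k) 0 else r) r
      = r + (ks.map (fun k => x.getD k 0 * y.getD (j - k) 0)).sum := by
  intro ks
  induction ks with
  | nil => simp
  | cons k ks ih =>
    intro r
    simp only [List.foldl_cons, List.map_cons, List.sum_cons]
    by_cases h : y.contains (j - k)
    · rw [if_pos h, ih]; ring
    · rw [if_neg h, ih, PySem.Dict.getD_of_not_contains y (0:Int) (by simpa using h)]; ring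

-- A's inner loop computes sVal
theorem innerA_eq (x y : PySem.Dict Int Int) (j : Int) :
    x.keys.foldl
      (fun r k => if y.contains (j - k) then r + x.getD k 0 * y.getD (j - k) 0 else r) 0
    = sVal x y j := by
  simpa [sVal] using innerA_gen x y j x.keys 0

-- A's outer loop over fresh ascending keys appends the nonzero entries
theorem outerA_items (x y : PySem.Dict Int Int) :
    ∀ (L : List Int) (z : PySem.Dict Int Int), L.Nodup → (∀ j ∈ L, z.contains j = false) →
    (L.foldl (fun z j => if ¬ sVal x y j = 0 then z.insert j (sVal x y j) else z) z).items
      = z.items ++ L.filterMap (fun j => if sVal x y j = 0 then none else some (j, sVal x y j)) := by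
  intro L
  induction L with
  | nil => simp
  | cons j L ih =>
    intro z hnd hfresh
    simp only [List.foldl_cons, List.filterMap_cons]
    by_cases h : sVal x y j = 0
    · rw [if_neg (by simpa using h), if_pos h]
      exact ih z hnd.of_cons (fun j' hj' => hfresh j' (List.mem_cons_of_mem _ hj'))
    · rw [if_pos (by simpa using h), if_neg h]
      rw [ih (z.insert j (sVal x y j)) hnd.of_cons ?_]
      · rw [PySem.Dict.items_insert_of_not_contains _ _ (hfresh j List.mem_cons_self)]
        simp
      · intro j' hj'
        rw [PySem.Dict.contains_insert]
        have hne : j' ≠ j := fun e => (List.nodup_cons.mp hnd).1 (e ▸ hj')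
        simp [hne, hfresh j' (List.mem_cons_of_mem _ hj')]

theorem convolutionA_items (x y : PySem.Dict Int Int) :
    (convolutionA x y).items
      = (PySem.List.pyRange (pyMinKey x + pyMinKey y) (pyMaxKey x + pyMaxKey y + 1) 1).filterMap
          (fun j => if sVal x y j = 0 then none else some (j, sVal x y j)) := by
  unfold convolutionA
  simp only [innerA_eq, List.sum_cons, List.sum_nil, add_zero]
  rw [outerA_items x y _ _ (PySem.List.nodup_pyRange_one _ _)
      (fun j _ => PySem.Dict.contains_empty j)]
  simp [PySem.Dict.empty]


-- a nonzero sum has a nonzero term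
theorem exists_ne_zero_of_sum_ne_zero {l : List Int} (h : l.sum ≠ 0) : ∃ t ∈ l, t ≠ 0 := by
  by_contra hc
  refine h (List.sum_eq_zero fun x hx => ?_)
  by_contra hx0
  exact hc ⟨x, hx, hx0⟩

-- nonzero coefficients only occur inside A's scanned range
theorem sVal_support (x y : PySem.Dict Int Int) (hx : x.keys ≠ []) (hy : y.keys ≠ [])
    (j : Int) (h : sVal x y j ≠ 0) :
    pyMinKey x + pyMinKey y ≤ j ∧ j ≤ pyMaxKey x + pyMaxKey y := by
  obtain ⟨t, ht, htne⟩ := exists_ne_zero_of_sum_ne_zero h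
  obtain ⟨k, hk, rfl⟩ := List.mem_map.mp ht
  have hyc : y.contains (j - k) = true := by
    by_contra hc
    rw [PySem.Dict.getD_of_not_contains y (0:Int) (Bool.not_eq_true _ ▸ hc)] at htne
    simp at htne
  have hky : j - k ∈ y.keys := (PySem.Dict.contains_iff_mem_keys y (j - k)).mp hyc
  obtain ⟨mx, hmx⟩ : ∃ m, PySem.List.min? x.keys (fun k => k) = some m := by
    cases hmx : PySem.List.min? x.keys (fun k => k) with
    | none => exact absurd ((PySem.List.min?_eq_none_iff _ _).mp hmx) hx
    | some m => exact ⟨m, rfl⟩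
  obtain ⟨my, hmy⟩ : ∃ m, PySem.List.min? y.keys (fun k => k) = some m := by
    cases hmy : PySem.List.min? y.keys (fun k => k) with
    | none => exact absurd ((PySem.List.min?_eq_none_iff _ _).mp hmy) hy
    | some m => exact ⟨m, rfl⟩
  obtain ⟨Mx, hMx⟩ : ∃ m, PySem.List.max? x.keys (fun k => k) = some m := by
    cases hMx : PySem.List.max? x.keys (fun k => k) with
    | none => exact absurd ((PySem.List.max?_eq_none_iff _ _).mp hMx) hx
    | some m => exact ⟨m, rfl⟩
  obtain ⟨My, hMy⟩ : ∃ m, PySem.List.max? y.keys (fun k => k) = some m := by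
    cases hMy : PySem.List.max? y.keys (fun k => k) with
    | none => exact absurd ((PySem.List.max?_eq_none_iff _ _).mp hMy) hy
    | some m => exact ⟨m, rfl⟩
  have h1 := PySem.List.min?_isMin hmx k hk
  have h2 := PySem.List.min?_isMin hmy (j - k) hky
  have h3 := PySem.List.max?_isMax hMx k hk
  have h4 := PySem.List.max?_isMax hMy (j - k) hky
  simp only [pyMinKey, pyMaxKey, hmx, hmy, hMx, hMy, Option.getD_some]
  omega

-- ==== B-side characterisation ====

-- B's double loop is a single accumulation over pairsProd
theorem cDict_eq (z d : List (Int × Int)) :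
    z.foldl (fun c p => d.foldl
        (fun c q => c.insert (p.1 + q.1) (c.getD (p.1 + q.1) 0 + p.2 * q.2)) c)
      (PySem.Dict.empty : PySem.Dict Int Int)
    = (pairsProd z d).foldl (fun c r => c.insert r.1 (c.getD r.1 0 + r.2)) PySem.Dict.empty := by
  rw [pairsProd, List.foldl_flatMap]
  simp only [List.foldl_map]

-- the accumulating fold sums all values whose key matches
theorem acc_getD (kk : Int) : ∀ (P : List (Int × Int)) (c0 : PySem.Dict Int Int),
    (P.foldl (fun c r => c.insert r.1 (c.getD r.1 0 + r.2)) c0).getD kk 0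
      = c0.getD kk 0 + ((P.filter (fun r => r.1 = kk)).map (·.2)).sum := by
  intro P
  induction P with
  | nil => simp
  | cons r P ih =>
    intro c0
    simp only [List.foldl_cons, List.filter_cons]
    by_cases h : r.1 = kk
    · rw [ih, PySem.Dict.getD_insert, if_pos h.symm, h]
      simp
      ring
    · rw [ih, PySem.Dict.getD_insert, if_neg (fun e => h e.symm)]
      simp [h]

-- in a duplicate-free dict the matching-value sum is the lookup
theorem filter_sum_getD : ∀ (d : List (Int × Int)), (d.map (·.1)).Nodup → ∀ (k : Int),
    ((d.filter (fun q => q.1 = k)).map (·.2)).sum = (PySem.Dict.mk d).getD k 0 := by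
  intro d
  induction d with
  | nil => intro _ k; rfl
  | cons q d ih =>
    intro hnd k
    obtain ⟨q1, q2⟩ := q
    simp only [List.filter_cons]
    by_cases h : q1 = k
    · simp only [List.map_cons, List.nodup_cons] at hnd
      have hq : q1 ∉ d.map (·.1) := hnd.1
      have hrest : ∀ r ∈ d, ¬ (r.1 = k) := by
        intro r hr e
        exact hq (by rw [h, ← e]; exact List.mem_map_of_mem hr)
      rw [if_pos (by simpa using h), List.filter_eq_nil_iff.mpr (by simpa using hrest)]
      simp [PySem.Dict.getD_eq_get?_getD, PySem.Dict.get?_mk_cons, h]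
    · simp only [List.map_cons, List.nodup_cons] at hnd
      rw [if_neg (by simpa using h), ih hnd.2 k]
      simp [PySem.Dict.getD_eq_get?_getD, PySem.Dict.get?_mk_cons, h]

-- the per-key total of pairsProd, one z-row at a time
theorem pairs_sum (d : List (Int × Int)) (hnd : (d.map (·.1)).Nodup) (j : Int) :
    ∀ (z : List (Int × Int)),
    (((pairsProd z d).filter (fun r => r.1 = j)).map (·.2)).sum
      = (z.map (fun p => p.2 * (PySem.Dict.mk d).getD (j - p.1) 0)).sum := by
  intro z
  induction z with
  | nil => simp [pairsProd]
  | cons p z ih =>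
    have hrow : (((d.map (fun q => (p.1 + q.1, p.2 * q.2))).filter
          (fun r => r.1 = j)).map (·.2)).sum
        = p.2 * (PySem.Dict.mk d).getD (j - p.1) 0 := by
      rw [List.filter_map, List.map_map]
      have hpred : (d.filter ((fun (r : Int × Int) => decide (r.1 = j)) ∘
            (fun q => (p.1 + q.1, p.2 * q.2))))
          = d.filter (fun q => q.1 = j - p.1) := by
        apply List.filter_congr
        intro q _
        simp only [Function.comp, decide_eq_decide]
        omega
      rw [hpred]
      have : ((d.filter (fun q => q.1 = j - p.1)).map
            ((fun (r : Int × Int) => r.2) ∘ (fun q => (p.1 + q.1, p.2 * q.2))))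
          = (d.filter (fun q => q.1 = j - p.1)).map (fun q => p.2 * q.2) := by
        simp [Function.comp]
      rw [this]
      have : ((d.filter (fun q => q.1 = j - p.1)).map (fun q => p.2 * q.2)).sum
          = p.2 * ((d.filter (fun q => q.1 = j - p.1)).map (·.2)).sum := by
        rw [← List.sum_map_mul_left]
      rw [this, filter_sum_getD d hnd]
    calc (((pairsProd (p :: z) d).filter (fun r => r.1 = j)).map (·.2)).sum
        = (((d.map (fun q => (p.1 + q.1, p.2 * q.2))).filter (fun r => r.1 = j)).map (·.2)).sum
          + (((pairsProd z d).filter (fun r => r.1 = j)).map (·.2)).sum := by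
          simp [pairsProd, List.filter_append]
      _ = _ := by rw [hrow, ih]; simp

-- sVal of literal dicts, row form
theorem sVal_mk (z : List (Int × Int)) (hnz : (z.map (·.1)).Nodup)
    (y : PySem.Dict Int Int) (j : Int) :
    sVal (PySem.Dict.mk z) y j = (z.map (fun p => p.2 * y.getD (j - p.1) 0)).sum := by
  unfold sVal
  rw [PySem.Dict.keys_mk, List.map_map]
  apply congrArg List.sum
  apply List.map_congr_left
  intro p hp
  simp only [Function.comp]
  rw [PySem.Dict.getD_of_mem_items (PySem.Dict.mk z) (show (p.1, p.2) ∈ z by simpa using hp)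
    (by simpa [PySem.Dict.keys_mk] using hnz)]

-- filter-then-map is the filterMap A's characterisation uses
theorem filter_map_filterMap (g : Int → Int) : ∀ (l : List Int),
    (l.filter (fun k => ¬ g k = 0)).map (fun k => (k, g k))
      = l.filterMap (fun j => if g j = 0 then none else some (j, g j)) := by
  intro l
  induction l with
  | nil => simp
  | cons k l ih =>
    simp only [List.filter_cons, List.filterMap_cons, decide_not]
    by_cases h : g k = 0
    · simpa [h] using ih
    · simpa [h] using ih

-- every key of B's accumulator dict
theorem cDict_keys (z d : List (Int × Int)) :
    ((pairsProd z d).foldl (fun c r => c.insert r.1 (c.getD r.1 0 + r.2))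
      (PySem.Dict.empty : PySem.Dict Int Int)).keys
    = PySem.Set.ofList ((pairsProd z d).map (·.1)) := by
  rw [PySem.Dict.keys_foldl_insert_key (pairsProd z d) (fun r => r.1)
    (fun c r => c.getD r.1 0 + r.2) PySem.Dict.empty]
  rw [PySem.Dict.keys_empty]
  exact PySem.Set.update_empty _

-- B's loop body, characterised
theorem convolutionB_eq (z d : List (Int × Int)) (hnz : (z.map (·.1)).Nodup)
    (hnd : (d.map (·.1)).Nodup) :
    convolutionB z d
      = (PySem.List.sorted (PySem.Set.ofList ((pairsProd z d).map (·.1))) (fun k => k) false).filterMap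
          (fun j => if sVal (PySem.Dict.mk z) (PySem.Dict.mk d) j = 0 then none
                    else some (j, sVal (PySem.Dict.mk z) (PySem.Dict.mk d) j)) := by
  unfold convolutionB
  have hc : ∀ j : Int,
      ((pairsProd z d).foldl (fun c r => c.insert r.1 (c.getD r.1 0 + r.2))
        (PySem.Dict.empty : PySem.Dict Int Int)).getD j 0
      = sVal (PySem.Dict.mk z) (PySem.Dict.mk d) j := by
    intro j
    rw [acc_getD, PySem.Dict.getD_empty, pairs_sum d hnd j z, sVal_mk z hnz]
    simp
  simp only [cDict_eq, cDict_keys, hc]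
  exact filter_map_filterMap _ _


-- support keys of a step appear among B's pairwise key sums
theorem support_mem (z d : List (Int × Int)) (hnz : (z.map (·.1)).Nodup)
    (j : Int) (h : sVal (PySem.Dict.mk z) (PySem.Dict.mk d) j ≠ 0) :
    j ∈ (pairsProd z d).map (·.1) := by
  rw [sVal_mk z hnz] at h
  obtain ⟨t, ht, htne⟩ := exists_ne_zero_of_sum_ne_zero h
  obtain ⟨p, hp, rfl⟩ := List.mem_map.mp ht
  have hgd : (PySem.Dict.mk d).getD (j - p.1) 0 ≠ 0 := by
    intro e
    rw [e] at htne
    simp at htne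
  have hc : (PySem.Dict.mk d).contains (j - p.1) = true := by
    by_contra hcc
    exact hgd (PySem.Dict.getD_of_not_contains _ _ (Bool.not_eq_true _ ▸ hcc))
  have hmem : j - p.1 ∈ (PySem.Dict.mk d).keys := (PySem.Dict.contains_iff_mem_keys _ _).mp hc
  rw [PySem.Dict.keys_mk] at hmem
  obtain ⟨q, hq, hq1⟩ := List.mem_map.mp hmem
  refine List.mem_map.mpr ⟨(p.1 + q.1, p.2 * q.2), ?_, by simp; omega⟩
  unfold pairsProd
  exact List.mem_flatMap.mpr ⟨p, hp, List.mem_map.mpr ⟨q, hq, rfl⟩⟩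

-- the per-step equality: A's helper and B's loop body agree
theorem step_items (z d : List (Int × Int)) (hz : z ≠ []) (hd : d ≠ [])
    (hnz : (z.map (·.1)).Nodup) (hnd : (d.map (·.1)).Nodup) :
    (convolutionA (PySem.Dict.mk z) (PySem.Dict.mk d)).items = convolutionB z d := by
  have hxk : (PySem.Dict.mk z).keys ≠ [] := by
    rw [PySem.Dict.keys_mk]; simpa using hz
  have hyk : (PySem.Dict.mk d).keys ≠ [] := by
    rw [PySem.Dict.keys_mk]; simpa using hd
  rw [convolutionA_items, convolutionB_eq z d hnz hnd,
    ← filter_map_filterMap, ← filter_map_filterMap]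
  have h1 := (PySem.List.pairwise_lt_pyRange_one
      (pyMinKey (PySem.Dict.mk z) + pyMinKey (PySem.Dict.mk d))
      (pyMaxKey (PySem.Dict.mk z) + pyMaxKey (PySem.Dict.mk d) + 1)).filter
    (fun k => decide (¬ sVal (PySem.Dict.mk z) (PySem.Dict.mk d) k = 0))
  have h2 := (PySem.List.sorted_ofList_pairwise_lt ((pairsProd z d).map (·.1))).filter
    (fun k => decide (¬ sVal (PySem.Dict.mk z) (PySem.Dict.mk d) k = 0))
  have hperm := (List.perm_ext_iff_of_nodup
      (h1.imp fun hab => ne_of_lt hab) (h2.imp fun hab => ne_of_lt hab)).mpr ?_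
  · exact congrArg _ (List.Perm.eq_of_pairwise
      (fun a b _ _ hab hba => absurd hab (not_lt.mpr hba.le)) h1 h2 hperm)
  · intro a
    simp only [List.mem_filter, decide_not, Bool.not_eq_eq_eq_not, Bool.not_true,
      decide_eq_false_iff_not, PySem.List.mem_sorted]
    constructor
    · rintro ⟨_, hne⟩
      exact ⟨(PySem.Set.mem_ofList _ _).mpr (support_mem z d hnz a hne), hne⟩
    · rintro ⟨_, hne⟩
      have hb := sVal_support (PySem.Dict.mk z) (PySem.Dict.mk d) hxk hyk a hne
      exact ⟨PySem.List.mem_pyRange_one.mpr ⟨hb.1, by omega⟩, hne⟩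

-- a sum with a single possibly-nonzero term
theorem sum_map_single : ∀ (l : List (Int × Int)), l.Nodup → ∀ (f : (Int × Int) → Int)
    (a : Int × Int), a ∈ l → (∀ b ∈ l, b ≠ a → f b = 0) → (l.map f).sum = f a := by
  intro l
  induction l with
  | nil => intro _ f a ha _; simp at ha
  | cons b l ih =>
    intro hnd f a ha h0
    rcases List.mem_cons.mp ha with rfl | hal
    · have : ∀ c ∈ l, f c = 0 := by
        intro c hc
        exact h0 c (List.mem_cons_of_mem _ hc)
          (fun e => (List.nodup_cons.mp hnd).1 (e ▸ hc))
      have hz0 : (List.map f l).sum = 0 := List.sum_eq_zero (by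
        intro t htm
        obtain ⟨c, hc, rfl⟩ := List.mem_map.mp htm
        exact this c hc)
      simp only [List.map_cons, List.sum_cons, hz0, add_zero]
    · have hb : f b = 0 := h0 b List.mem_cons_self
        (fun e => (List.nodup_cons.mp hnd).1 (e ▸ hal))
      simp only [List.map_cons, List.sum_cons, hb, zero_add]
      exact ih (List.nodup_cons.mp hnd).2 f a hal
        (fun c hc => h0 c (List.mem_cons_of_mem _ hc))

-- duplicate-free first components determine the pair
theorem fst_inj : ∀ (l : List (Int × Int)), (l.map (·.1)).Nodup →
    ∀ p ∈ l, ∀ q ∈ l, p.1 = q.1 → p = q := by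
  intro l
  induction l with
  | nil => simp
  | cons a l ih =>
    intro h p hp q hq e
    simp only [List.map_cons, List.nodup_cons] at h
    rcases List.mem_cons.mp hp with rfl | hp' <;> rcases List.mem_cons.mp hq with rfl | hq'
    · rfl
    · exact absurd (by rw [e]; exact List.mem_map_of_mem hq') h.1
    · exact absurd (by rw [← e]; exact List.mem_map_of_mem hp') h.1
    · exact ih h.2 p hp' q hq' e

-- the smallest nonzero-valued key sum keeps a nonzero coefficient
theorem sVal_nz_min_ne (z d : List (Int × Int))
    (hnz : (z.map (·.1)).Nodup) (hnd : (d.map (·.1)).Nodup)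
    (hz' : ∃ p ∈ z, p.2 ≠ 0) (hd' : ∃ p ∈ d, p.2 ≠ 0) :
    ∃ j, sVal (PySem.Dict.mk z) (PySem.Dict.mk d) j ≠ 0 := by
  have hfz : z.filter (fun p => p.2 ≠ 0) ≠ [] := by
    obtain ⟨p, hp, hp2⟩ := hz'
    intro e
    have hmem : p ∈ z.filter (fun p => p.2 ≠ 0) :=
      List.mem_filter.mpr ⟨hp, by simpa using hp2⟩
    rw [e] at hmem
    exact absurd hmem (List.not_mem_nil)
  have hfd : d.filter (fun p => p.2 ≠ 0) ≠ [] := by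
    obtain ⟨p, hp, hp2⟩ := hd'
    intro e
    have hmem : p ∈ d.filter (fun p => p.2 ≠ 0) :=
      List.mem_filter.mpr ⟨hp, by simpa using hp2⟩
    rw [e] at hmem
    exact absurd hmem (List.not_mem_nil)
  obtain ⟨pm, hpm⟩ : ∃ m, PySem.List.min? (z.filter (fun p => p.2 ≠ 0)) (fun p => p.1) = some m := by
    cases hm : PySem.List.min? (z.filter (fun p => p.2 ≠ 0)) (fun p => p.1) with
    | none => exact absurd ((PySem.List.min?_eq_none_iff _ _).mp hm) hfz
    | some m => exact ⟨m, rfl⟩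
  obtain ⟨qm, hqm⟩ : ∃ m, PySem.List.min? (d.filter (fun p => p.2 ≠ 0)) (fun p => p.1) = some m := by
    cases hm : PySem.List.min? (d.filter (fun p => p.2 ≠ 0)) (fun p => p.1) with
    | none => exact absurd ((PySem.List.min?_eq_none_iff _ _).mp hm) hfd
    | some m => exact ⟨m, rfl⟩
  have hpmz : pm ∈ z ∧ pm.2 ≠ 0 := by
    have := List.mem_filter.mp (PySem.List.min?_mem hpm)
    exact ⟨this.1, by simpa using this.2⟩
  have hqmz : qm ∈ d ∧ qm.2 ≠ 0 := by
    have := List.mem_filter.mp (PySem.List.min?_mem hqm)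
    exact ⟨this.1, by simpa using this.2⟩
  have hpmin : ∀ q ∈ z, q.2 ≠ 0 → pm.1 ≤ q.1 := fun q hq h2 =>
    PySem.List.min?_isMin hpm q (List.mem_filter.mpr ⟨hq, by simpa using h2⟩)
  have hqmin : ∀ q ∈ d, q.2 ≠ 0 → qm.1 ≤ q.1 := fun q hq h2 =>
    PySem.List.min?_isMin hqm q (List.mem_filter.mpr ⟨hq, by simpa using h2⟩)
  refine ⟨pm.1 + qm.1, ?_⟩
  rw [sVal_mk z hnz]
  have hsingle : (z.map (fun p => p.2 * (PySem.Dict.mk d).getD (pm.1 + qm.1 - p.1) 0)).sum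
      = pm.2 * (PySem.Dict.mk d).getD (pm.1 + qm.1 - pm.1) 0 := by
    apply sum_map_single z (List.Nodup.of_map _ hnz) _ pm hpmz.1
    intro b hb hne
    by_cases hb2 : b.2 = 0
    · rw [hb2, zero_mul]
    · have hblt : pm.1 < b.1 :=
        lt_of_le_of_ne (hpmin b hb hb2)
          (fun e => hne (fst_inj z hnz b hb pm hpmz.1 e.symm))
      cases hget : (PySem.Dict.mk d).get? (pm.1 + qm.1 - b.1) with
      | none => rw [PySem.Dict.getD_of_get?_eq_none _ _ hget, mul_zero]
      | some v =>
        have hv : (pm.1 + qm.1 - b.1, v) ∈ d :=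
          PySem.Dict.mem_items_of_get?_eq_some _ hget
        have hv0 : v = 0 := by
          by_contra hv0
          have := hqmin (pm.1 + qm.1 - b.1, v) hv hv0
          simp at this
          omega
        rw [PySem.Dict.getD_of_get?_eq_some _ _ hget, hv0, mul_zero]
  rw [hsingle, show pm.1 + qm.1 - pm.1 = qm.1 by omega]
  have hqmem : (qm.1, qm.2) ∈ (PySem.Dict.mk d).items := hqmz.1
  rw [PySem.Dict.getD_of_mem_items _ hqmem (by simpa [PySem.Dict.keys_mk] using hnd)]
  exact mul_ne_zero hpmz.2 hqmz.2

-- the step output is nonempty, duplicate-free, and all its values are nonzero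
theorem step_good (z d : List (Int × Int))
    (hnz : (z.map (·.1)).Nodup) (hnd : (d.map (·.1)).Nodup)
    (hz' : ∃ p ∈ z, p.2 ≠ 0) (hd' : ∃ p ∈ d, p.2 ≠ 0) :
    Good (convolutionB z d) := by
  have hrep := convolutionB_eq z d hnz hnd
  rw [← filter_map_filterMap] at hrep
  obtain ⟨j0, hne⟩ := sVal_nz_min_ne z d hnz hnd hz' hd'
  have hj0mem : j0 ∈ (PySem.List.sorted
      (PySem.Set.ofList ((pairsProd z d).map (·.1))) (fun k => k) false).filter
      (fun k => ¬ sVal (PySem.Dict.mk z) (PySem.Dict.mk d) k = 0) := by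
    rw [List.mem_filter]
    refine ⟨(PySem.List.mem_sorted _ _ _ _).mpr
      ((PySem.Set.mem_ofList _ _).mpr (support_mem z d hnz j0 hne)), by simpa using hne⟩
  refine ⟨?_, ?_, ?_⟩
  · -- nonempty: the found support key survives the filter
    intro hemp
    rw [hrep, List.map_eq_nil_iff] at hemp
    rw [hemp] at hj0mem
    exact absurd hj0mem (List.not_mem_nil)
  · -- duplicate-free keys
    rw [hrep, List.map_map]
    have h2 := ((PySem.List.sorted_ofList_pairwise_lt ((pairsProd z d).map (·.1))).filter
      (fun k => decide (¬ sVal (PySem.Dict.mk z) (PySem.Dict.mk d) k = 0))).imp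
      (fun hab => ne_of_lt hab)
    have hid : ((fun (x : Int × Int) => x.1) ∘
        fun k => (k, sVal (PySem.Dict.mk z) (PySem.Dict.mk d) k)) = fun k => k := rfl
    rw [hid]
    simpa using h2
  · -- a nonzero value survives
    refine ⟨(j0, sVal (PySem.Dict.mk z) (PySem.Dict.mk d) j0), ?_, by simpa using hne⟩
    rw [hrep]
    exact List.mem_map.mpr ⟨j0, hj0mem, rfl⟩

-- once the index is ≥ 2 the enumerate loop never skips
theorem enum_fold : ∀ (xs : List (List (Int × Int))) (st : Int) (z : PySem.Dict Int Int),
    2 ≤ st →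
    (PySem.List.enumerate xs st).foldl
      (fun z p => if p.1 < 2 then z else convolutionA z (PySem.Dict.mk p.2)) z
    = xs.foldl (fun z d => convolutionA z (PySem.Dict.mk d)) z := by
  intro xs
  induction xs with
  | nil => intro st z _; rfl
  | cons d xs ih =>
    intro st z hst
    rw [PySem.List.enumerate_cons]
    simp only [List.foldl_cons]
    rw [if_neg (by simp; omega)]
    exact ih (st + 1) _ (by omega)

-- the chained folds agree, carrying the invariant
theorem main_fold : ∀ (rest : List (List (Int × Int))) (zl : List (Int × Int)),
    Good zl →
    (∀ d ∈ rest, d ≠ [] ∧ (d.map (·.1)).Nodup ∧ (∃ p ∈ d, p.2 ≠ 0)) →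
    (rest.foldl (fun z d => convolutionA z (PySem.Dict.mk d)) (PySem.Dict.mk zl)).items
      = rest.foldl convolutionB zl := by
  intro rest
  induction rest with
  | nil => intro zl _ _; rfl
  | cons d rest ih =>
    intro zl hg hrest
    obtain ⟨hd0, hdn, hdp⟩ := hrest d List.mem_cons_self
    obtain ⟨hz0, hzn, hzp⟩ := hg
    simp only [List.foldl_cons]
    rw [PySem.Dict.ext (step_items zl d hz0 hd0 hzn hdn)]
    exact ih (convolutionB zl d)
      (step_good zl d hzn hdn hzp hdp)
      (fun d' hd' => hrest d' (List.mem_cons_of_mem _ hd'))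

theorem convolution_list_spec : Claim_equal_convolution_list := by
  intro x _ hpre
  obtain ⟨hlen, hall⟩ := hpre
  unfold Spec_convolution_list
  obtain ⟨x0, x1, rest, rfl⟩ : ∃ a b r, x = a :: b :: r := by
    match x with
    | a :: b :: r => exact ⟨a, b, r, rfl⟩
    | [] => simp at hlen
    | [a] => simp at hlen
  obtain ⟨h00, h0n, _⟩ := hall x0 List.mem_cons_self
  obtain ⟨h10, h1n, _⟩ := hall x1 (List.mem_cons_of_mem _ List.mem_cons_self)
  unfold convolution_list convolution_list_alt
  rw [PySem.List.slice_from_one]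
  have hg0 : PySem.List.pyGet? (x0 :: x1 :: rest) (0 : Int) = some x0 := by simp [pysem]
  have hg1 : PySem.List.pyGet? (x0 :: x1 :: rest) (1 : Int) = some x1 := by simp [pysem]
  rw [hg0, hg1]
  simp only [Option.getD_some, List.tail_cons, List.foldl_cons]
  rw [PySem.List.enumerate_cons, PySem.List.enumerate_cons]
  simp only [List.foldl_cons]
  rw [if_pos (by norm_num), if_pos (by norm_num),
    show (0:Int) + 1 + 1 = 2 from by norm_num, enum_fold rest 2 _ (by omega)]
  rw [PySem.Dict.ext (step_items x0 x1 h00 h10 h0n h1n)]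
  cases rest with
  | nil => rfl
  | cons d2 rest2 =>
    have hlen3 : ¬ (x0 :: x1 :: d2 :: rest2).length = 2 := by simp
    have hnz : ∀ d ∈ x0 :: x1 :: d2 :: rest2, ∃ p ∈ d, p.2 ≠ 0 := by
      intro d hd
      rcases (hall d hd).2.2 with h2 | h2
      · exact absurd h2 hlen3
      · exact h2
    exact main_fold (d2 :: rest2) (convolutionB x0 x1)
      (step_good x0 x1 h0n h1n
        (hnz x0 List.mem_cons_self)
        (hnz x1 (List.mem_cons_of_mem _ List.mem_cons_self)))
      (fun d' hd' => ⟨(hall d' (List.mem_cons_of_mem _ (List.mem_cons_of_mem _ hd'))).1,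
        (hall d' (List.mem_cons_of_mem _ (List.mem_cons_of_mem _ hd'))).2.1,
        hnz d' (List.mem_cons_of_mem _ (List.mem_cons_of_mem _ hd'))⟩)
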